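-- pv_equiv track=rewrite | github.com/utk-se/WorldSyntaxTree | wsyntree_collector/file/parse_file_pygments.py | get_newline_indices
-- ===== SOURCE A (Python) =====
-- def get_newline_indices(s):
--     last_newline_idx = -1
--     newline_idx_vec = []
--     while True:
--         last_newline_idx = s.find('\n', last_newline_idx+1)
--         if last_newline_idx == -1:
--             break
--         newline_idx_vec.append(last_newline_idx)
--     return newline_idx_vec
-- ===== SOURCE B (Python) =====
-- def get_newline_indices(s):
--     return [i for i, ch in enumerate(s) if ch == '\n']
-- ===== Notes on version B (the rewrite author's own statement) =====
-- stated objective: simpler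
-- what changed: Replaced the repeated-str.find/while-True/break loop with a single enumerate-and-filter list comprehension over the characters.
import Mathlib
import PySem

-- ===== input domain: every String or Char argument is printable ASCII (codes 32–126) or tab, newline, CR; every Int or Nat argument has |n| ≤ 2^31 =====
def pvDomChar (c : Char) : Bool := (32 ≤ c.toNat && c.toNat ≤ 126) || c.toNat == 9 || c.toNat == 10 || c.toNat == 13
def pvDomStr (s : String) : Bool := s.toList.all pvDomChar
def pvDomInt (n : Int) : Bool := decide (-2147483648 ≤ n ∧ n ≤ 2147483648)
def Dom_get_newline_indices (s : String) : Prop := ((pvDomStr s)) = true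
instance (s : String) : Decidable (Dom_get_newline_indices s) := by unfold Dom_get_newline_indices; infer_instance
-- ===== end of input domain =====

-- B replaces A's repeated str.find loop with one enumerate-and-filter pass (objective: simpler).

-- ===== PORT A =====
-- fuel = length + 1 is a totality guard only: the loop runs at most (#newlines + 1) times.
def pvLoopA (s : String) (fuel : Nat) (last : Int) (acc : List Int) : List Int :=
  match fuel with
  | 0 => acc
  | f + 1 =>
    let j := PySem.Str.findFrom s "\n" (last + 1) none
    if j = -1 then acc
    else pvLoopA s f j (acc ++ [j])

def get_newline_indices (s : String) : List Int :=
  pvLoopA s (s.toList.length + 1) (-1) []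

-- ===== PORT B =====
def get_newline_indices_alt (s : String) : List Int :=
  ((PySem.List.enumerate s.toList 0).filter (fun p => p.2 == '\n')).map (fun p => p.1)

-- ===== PRECONDITION & SPEC =====
def Spec_get_newline_indices (s : String) (out : List Int) : Prop := out = get_newline_indices_alt s
instance (s : String) (out : List Int) : Decidable (Spec_get_newline_indices s out) := by unfold Spec_get_newline_indices; infer_instance

-- ===== CLAIM (what is proved, stated in full; the proofs are below) =====
def Claim_equal_get_newline_indices : Prop := ∀ (s : String), Dom_get_newline_indices s → Spec_get_newline_indices s (get_newline_indices s)

-- ===== LEMMAS AND PROOFS =====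

-- canonical form: newline indices of t, offset k
def pvP (t : List Char) (k : Int) : List Int :=
  match t with
  | [] => []
  | c :: t => if c = '\n' then k :: pvP t (k + 1) else pvP t (k + 1)

theorem pvB_eq_pvP (t : List Char) (k : Int) :
    ((PySem.List.enumerate t k).filter (fun p => p.2 == '\n')).map (fun p => p.1) = pvP t k := by
  induction t generalizing k with
  | nil => simp [PySem.List.enumerate_nil, pvP]
  | cons c t ih =>
    simp only [PySem.List.enumerate_cons, List.filter_cons, pvP]
    by_cases h : c = '\n' <;> simp [h, ih]

theorem pv_singleton_prefix_iff (c : Char) (u : List Char) : [c] <+: u ↔ u.head? = some c := by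
  cases u with
  | nil => simp
  | cons d u =>
    simp [List.cons_prefix_cons]
    exact eq_comm

theorem pvP_eq_nil (t : List Char) (k : Int) (h : '\n' ∉ t) : pvP t k = [] := by
  induction t generalizing k with
  | nil => rfl
  | cons c t ih =>
    simp only [List.mem_cons, not_or] at h
    simp [pvP, Ne.symm h.1, ih _ h.2]

theorem pvP_eq_cons (m : Nat) (t : List Char) (k : Int)
    (hm : t[m]? = some '\n') (hmin : ∀ i < m, t[i]? ≠ some '\n') :
    pvP t k = (k + m) :: pvP (t.drop (m + 1)) (k + m + 1) := by
  induction m generalizing t k with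
  | zero =>
    cases t with
    | nil => simp at hm
    | cons c t => simp_all [pvP]
  | succ m ih =>
    cases t with
    | nil => simp at hm
    | cons c t =>
      have hc : c ≠ '\n' := by
        intro h; exact hmin 0 (Nat.succ_pos m) (by simp [h])
      have hmin' : ∀ i < m, t[i]? ≠ some '\n' := by
        intro i hi; exact fun h => hmin (i + 1) (by omega) (by simpa using h)
      have := ih t (k + 1) (by simpa using hm) hmin'
      simp only [pvP, hc, if_false, List.drop_succ_cons]
      rw [this, show (k : Int) + 1 + (m : Int) = k + ((m + 1 : Nat) : Int) by push_cast; ring]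

theorem pvLoopA_eq (s : String) (fuel : Nat) (k : Nat) (last : Int) (acc : List Int)
    (hk : k ≤ s.toList.length) (hf : s.toList.length - k < fuel) (hlast : last + 1 = (k : Int)) :
    pvLoopA s fuel last acc = acc ++ pvP (s.toList.drop k) (k : Int) := by
  induction fuel generalizing k last acc with
  | zero => omega
  | succ f ih =>
    simp only [pvLoopA, hlast]
    have hff : PySem.Str.findFrom s "\n" (k : Int) none =
        if PySem.Chars.find (s.toList.drop k) "\n".toList = -1 then -1
        else (k : Int) + PySem.Chars.find (s.toList.drop k) "\n".toList := by
      rw [PySem.Str.findFrom_eq, PySem.Chars.findFrom_natCast _ _ _ hk]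
    by_cases hfind : PySem.Chars.find (s.toList.drop k) "\n".toList = -1
    · rw [hff, if_pos hfind, if_pos rfl]
      have hni : ¬ ("\n".toList <:+: s.toList.drop k) :=
        (PySem.Chars.find_eq_neg_one_iff _ _).mp hfind
      have : '\n' ∉ s.toList.drop k := by
        intro hmem
        obtain ⟨l1, l2, h12⟩ := List.append_of_mem hmem
        exact hni ⟨l1, l2, by rw [h12]; simp⟩
      rw [pvP_eq_nil _ _ this, List.append_nil]
    · rw [hff, if_neg hfind]
      have hnn : 0 ≤ PySem.Chars.find (s.toList.drop k) "\n".toList := by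
        rcases (PySem.Chars.neg_one_le_find (s.toList.drop k) "\n".toList).lt_or_eq with h | h
        · omega
        · exact absurd h.symm hfind
      set m : Nat := (PySem.Chars.find (s.toList.drop k) "\n".toList).toNat with hmdef
      have hmcast : PySem.Chars.find (s.toList.drop k) "\n".toList = (m : Int) := by omega
      have hspec := PySem.Chars.find_spec hnn
      have hm : (s.toList.drop k)[m]? = some '\n' := by
        have := hspec.1
        rw [← List.head?_drop]
        have : ['\n'] <+: (s.toList.drop k).drop m := by simpa [hmdef] using this
        exact (pv_singleton_prefix_iff _ _).mp this
      have hmin : ∀ i < m, (s.toList.drop k)[i]? ≠ some '\n' := by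
        intro i hi hcontra
        refine hspec.2 i (by omega) ?_
        show ['\n'] <+: _
        exact (pv_singleton_prefix_iff _ _).mpr (by rw [List.head?_drop]; exact hcontra)
      have hmlt : m < s.toList.length - k := by
        have := List.getElem?_eq_some_iff.mp hm
        obtain ⟨hlt, _⟩ := this
        simpa [List.length_drop] using hlt
      have hcond : ¬ ((k : Int) + (m : Int) = -1) := by omega
      rw [hmcast, if_neg hcond]
      have hrec := ih (k + m + 1) ((k : Int) + (m : Int)) (acc ++ [(k : Int) + (m : Int)])
        (by omega) (by omega) (by push_cast; ring)
      rw [hrec]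
      rw [pvP_eq_cons m _ _ hm hmin]
      simp only [List.drop_drop, List.append_assoc, List.cons_append, List.nil_append]
      congr 2

-- ===== VERDICT (by name: the statement is the Claim_ definition above) =====
theorem get_newline_indices_spec : Claim_equal_get_newline_indices := by
  intro s _
  unfold Spec_get_newline_indices get_newline_indices get_newline_indices_alt
  rw [pvLoopA_eq s _ 0 (-1) [] (Nat.zero_le _) (by omega) (by norm_num)]
  rw [pvB_eq_pvP]
  simp
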